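-- pv_equiv track=rewrite | github.com/baereilon/locaited | src/agents/researcher.py | _extract_interests
-- ===== SOURCE A (Python) =====
-- from typing import List, Dict, Any, Optional
--
-- def _extract_interests(keywords: List[str]) -> List[str]:
--     """Extract interest areas from keywords."""
--     interest_keywords = {
--         "protest": ["protest", "march", "rally", "demonstration"],
--         "cultural": ["cultural", "festival", "art", "music", "theater"],
--         "political": ["political", "government", "mayor", "council", "policy"]
--     }
--
--     interests = []
--     for interest, terms in interest_keywords.items():
--         if any(term in keyword.lower() for keyword in keywords for term in terms):
--             interests.append(interest)
--
--     return interests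
-- ===== SOURCE B (Python) =====
-- def _extract_interests(keywords):
--     """Extract interest areas from keywords."""
--     interest_keywords = {
--         "protest": ["protest", "march", "rally", "demonstration"],
--         "cultural": ["cultural", "festival", "art", "music", "theater"],
--         "political": ["political", "government", "mayor", "council", "policy"]
--     }
--     term_to_interest = {t: i for i, terms in interest_keywords.items() for t in terms}
--     found = set()
--     for kw in keywords:
--         kl = kw.lower()
--         for term, interest in term_to_interest.items():
--             if term in kl:
--                 found.add(interest)
--     return [i for i in interest_keywords if i in found]
-- ===== Notes on version B (the rewrite author's own statement) =====
-- stated objective: faster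
-- what changed: B inverts the loop structure: instead of scanning all keywords once per category (lowercasing each keyword on every scan), it prebuilds a term-to-category index, makes one pass over the keywords lowercasing each keyword once and collecting hit categories into a set, then restores the category order by filtering the category list.
import Mathlib
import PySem

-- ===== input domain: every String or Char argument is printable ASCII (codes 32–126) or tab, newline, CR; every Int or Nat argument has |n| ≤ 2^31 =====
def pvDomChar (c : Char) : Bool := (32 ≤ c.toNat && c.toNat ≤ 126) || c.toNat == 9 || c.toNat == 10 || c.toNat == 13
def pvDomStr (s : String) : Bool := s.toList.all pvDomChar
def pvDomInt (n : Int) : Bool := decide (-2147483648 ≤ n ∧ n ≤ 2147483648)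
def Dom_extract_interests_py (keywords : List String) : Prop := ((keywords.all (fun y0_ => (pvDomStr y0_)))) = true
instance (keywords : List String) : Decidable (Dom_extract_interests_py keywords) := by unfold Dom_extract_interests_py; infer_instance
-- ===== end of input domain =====

-- B replaces A's per-category rescans of the keyword list by one keyword pass over a prebuilt
-- term→category index collecting hits into a set, lowercasing each keyword once (objective: faster, measured).

-- ===== PORT A =====
-- the literal dict 'interest_keywords' (insertion order)
def pvInterestTable : List (String × List String) :=
  [("protest", ["protest", "march", "rally", "demonstration"]),
   ("cultural", ["cultural", "festival", "art", "music", "theater"]),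
   ("political", ["political", "government", "mayor", "council", "policy"])]

def extract_interests_py (keywords : List String) : List String :=
  pvInterestTable.foldl
    (fun interests p =>
      if keywords.any (fun kw => p.2.any (fun term => PySem.Str.isIn term (PySem.Str.lower kw))) then
        interests ++ [p.1]
      else interests) []

-- ===== PORT B =====
-- the dict comprehension 'term_to_interest' (all terms distinct, so insertion order = flattened table order)
def pvTermToInterest : List (String × String) :=
  pvInterestTable.flatMap (fun p => p.2.map (fun t => (t, p.1)))

def extract_interests_py_alt (keywords : List String) : List String :=
  let found : PySem.Set String :=
    keywords.foldl
      (fun found kw =>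
        let kl := PySem.Str.lower kw
        pvTermToInterest.foldl
          (fun f q => if PySem.Str.isIn q.1 kl then PySem.Set.add f q.2 else f) found)
      PySem.Set.empty
  (pvInterestTable.map Prod.fst).filter (fun i => PySem.Set.contains found i)

-- ===== PRECONDITION & SPEC =====
def Spec_extract_interests_py (keywords : List String) (out : List String) : Prop := out = extract_interests_py_alt keywords
instance (keywords : List String) (out : List String) : Decidable (Spec_extract_interests_py keywords out) := by unfold Spec_extract_interests_py; infer_instance

-- ===== CLAIM (what is proved, stated in full; the proofs are below) =====
def Claim_equal_extract_interests_py : Prop := ∀ (keywords : List String), Dom_extract_interests_py keywords → Spec_extract_interests_py keywords (extract_interests_py keywords)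

-- ===== LEMMAS AND PROOFS =====

-- membership in an add-if fold over an arbitrary list
theorem mem_foldl_addIf {α β : Type} [BEq β] [LawfulBEq β]
    (c : α → Bool) (g : α → β) (l : List α) (s : PySem.Set β) (x : β) :
    (x ∈ l.foldl (fun f a => if c a then PySem.Set.add f (g a) else f) s) ↔
      x ∈ s ∨ ∃ a ∈ l, c a = true ∧ g a = x := by
  induction l generalizing s with
  | nil => simp
  | cons a l ih =>
    simp only [List.foldl_cons, ih, List.mem_cons]
    by_cases h : c a = true
    · simp only [h, if_true, PySem.Set.mem_add]
      constructor
      · rintro (⟨hx | hx⟩ | ⟨b, hb, hcb, hgb⟩)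
        · exact Or.inl hx
        · exact Or.inr ⟨a, Or.inl rfl, h, hx.symm⟩
        · exact Or.inr ⟨b, Or.inr hb, hcb, hgb⟩
      · rintro (hx | ⟨b, (rfl | hb), hcb, hgb⟩)
        · exact Or.inl (Or.inl hx)
        · exact Or.inl (Or.inr hgb.symm)
        · exact Or.inr ⟨b, hb, hcb, hgb⟩
    · simp only [h]
      constructor
      · rintro (hx | ⟨b, hb, hcb, hgb⟩)
        · exact Or.inl hx
        · exact Or.inr ⟨b, Or.inr hb, hcb, hgb⟩
      · rintro (hx | ⟨b, (rfl | hb), hcb, hgb⟩)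
        · exact Or.inl hx
        · exact absurd hcb h
        · exact Or.inr ⟨b, hb, hcb, hgb⟩

-- membership in B's accumulated set, for any pair index
theorem mem_found_gen (pairs : List (String × String)) (keywords : List String) (x : String) :
    (x ∈ keywords.foldl
        (fun found kw =>
          let kl := PySem.Str.lower kw
          pairs.foldl
            (fun f q => if PySem.Str.isIn q.1 kl then PySem.Set.add f q.2 else f) found)
        PySem.Set.empty) ↔
      ∃ kw ∈ keywords, ∃ q ∈ pairs,
        PySem.Str.isIn q.1 (PySem.Str.lower kw) = true ∧ q.2 = x := by
  have gen : ∀ (l : List String) (s : PySem.Set String),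
      (x ∈ l.foldl
          (fun found kw =>
            pairs.foldl
              (fun f q => if PySem.Str.isIn q.1 (PySem.Str.lower kw) then PySem.Set.add f q.2 else f) found)
          s) ↔
        x ∈ s ∨ ∃ kw ∈ l, ∃ q ∈ pairs,
          PySem.Str.isIn q.1 (PySem.Str.lower kw) = true ∧ q.2 = x := by
    intro l
    induction l with
    | nil => simp
    | cons kw l ih =>
      intro s
      rw [List.foldl_cons, ih,
        mem_foldl_addIf (fun q => PySem.Str.isIn q.1 (PySem.Str.lower kw)) Prod.snd pairs s x]
      simp only [List.mem_cons]
      constructor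
      · rintro ((h | ⟨q, hq, hc, hg⟩) | ⟨kw', hkw', rest⟩)
        · exact Or.inl h
        · exact Or.inr ⟨kw, Or.inl rfl, q, hq, hc, hg⟩
        · exact Or.inr ⟨kw', Or.inr hkw', rest⟩
      · rintro (h | ⟨kw', (rfl | hkw'), rest⟩)
        · exact Or.inl (Or.inl h)
        · exact Or.inl (Or.inr rest)
        · exact Or.inr ⟨kw', hkw', rest⟩
  simpa using gen keywords PySem.Set.empty

-- A's condition for the "protest" category, phrased as a hit in the flattened index
theorem cond_protest (keywords : List String) :
    (keywords.any (fun kw => ["protest", "march", "rally", "demonstration"].any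
        (fun term => PySem.Str.isIn term (PySem.Str.lower kw))) = true) ↔
      ∃ kw ∈ keywords, ∃ q ∈ pvTermToInterest,
        PySem.Str.isIn q.1 (PySem.Str.lower kw) = true ∧ q.2 = "protest" := by
  simp [pvTermToInterest, pvInterestTable, List.any_eq_true]

-- ===== VERDICT (by name: the statement is the Claim_ definition above) =====
theorem extract_interests_py_spec : Claim_equal_extract_interests_py := by
  intro keywords _
  unfold Spec_extract_interests_py extract_interests_py extract_interests_py_alt
  rw [show pvInterestTable.map Prod.fst = ["protest", "cultural", "political"] from rfl]
  generalize hF : (keywords.foldl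
      (fun found kw =>
        let kl := PySem.Str.lower kw
        pvTermToInterest.foldl
          (fun f q => if PySem.Str.isIn q.1 kl then PySem.Set.add f q.2 else f) found)
      PySem.Set.empty) = F
  have hmem : ∀ x, F.contains x = true ↔ ∃ kw ∈ keywords, ∃ q ∈ pvTermToInterest,
      PySem.Str.isIn q.1 (PySem.Str.lower kw) = true ∧ q.2 = x := by
    intro x
    rw [← hF, PySem.Set.contains_iff]
    exact mem_found_gen pvTermToInterest keywords x
  have h1 : (keywords.any (fun kw => ["protest", "march", "rally", "demonstration"].any
      (fun term => PySem.Str.isIn term (PySem.Str.lower kw)))) = F.contains "protest" := by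
    rw [Bool.eq_iff_iff, hmem]; exact cond_protest keywords
  have h2 : (keywords.any (fun kw => ["cultural", "festival", "art", "music", "theater"].any
      (fun term => PySem.Str.isIn term (PySem.Str.lower kw)))) = F.contains "cultural" := by
    rw [Bool.eq_iff_iff, hmem]
    simp [pvTermToInterest, pvInterestTable, List.any_eq_true]
  have h3 : (keywords.any (fun kw => ["political", "government", "mayor", "council", "policy"].any
      (fun term => PySem.Str.isIn term (PySem.Str.lower kw)))) = F.contains "political" := by
    rw [Bool.eq_iff_iff, hmem]
    simp [pvTermToInterest, pvInterestTable, List.any_eq_true]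
  simp only [pvInterestTable, List.foldl_cons, List.foldl_nil, List.filter_cons, List.filter_nil]
  rw [h1, h2, h3]
  cases F.contains "protest" <;> cases F.contains "cultural" <;> cases F.contains "political" <;> simp
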